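-- pv_equiv track=rewrite | github.com/Forcray1/A-Maze-Ing | cli/display.py | _path_points_from_moves
-- ===== SOURCE A (Python) =====
-- def _path_points_from_moves(
--     start: tuple[int, int],
--     moves: str,
-- ) -> list[tuple[int, int]]:
--     """
--     Build path coordinates from a start position and a movement string.
--     """
--     x, y = start
--     points = [start]
--
--     for move in moves:
--         if move == "N":
--             y -= 1
--         elif move == "S":
--             y += 1
--         elif move == "E":
--             x += 1
--         elif move == "W":
--             x -= 1
--         else:
--             raise ValueError(f"Unknown move: {move}")
--         points.append((x, y))
--
--     return points
-- ===== SOURCE B (Python) =====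
-- def _path_points_from_moves(start, moves):
--     for move in moves:
--         if move not in "NSEW":
--             raise ValueError(f"Unknown move: {move}")
--     x0, y0 = start
--     chars = list(moves)
--     return [
--         (x0 + chars[:i].count("E") - chars[:i].count("W"),
--          y0 + chars[:i].count("S") - chars[:i].count("N"))
--         for i in range(len(chars) + 1)
--     ]
-- ===== Notes on version B (the rewrite author's own statement) =====
-- stated objective: alternative
-- what changed: Replaced A's single stateful loop (mutable x/y updated per move, list appended as it goes) with a stateless per-index closed form: after validating the string, point i is computed independently as start plus the net E-minus-W and S-minus-N character counts of the prefix moves[:i]; no running position is maintained.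
import Mathlib
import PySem

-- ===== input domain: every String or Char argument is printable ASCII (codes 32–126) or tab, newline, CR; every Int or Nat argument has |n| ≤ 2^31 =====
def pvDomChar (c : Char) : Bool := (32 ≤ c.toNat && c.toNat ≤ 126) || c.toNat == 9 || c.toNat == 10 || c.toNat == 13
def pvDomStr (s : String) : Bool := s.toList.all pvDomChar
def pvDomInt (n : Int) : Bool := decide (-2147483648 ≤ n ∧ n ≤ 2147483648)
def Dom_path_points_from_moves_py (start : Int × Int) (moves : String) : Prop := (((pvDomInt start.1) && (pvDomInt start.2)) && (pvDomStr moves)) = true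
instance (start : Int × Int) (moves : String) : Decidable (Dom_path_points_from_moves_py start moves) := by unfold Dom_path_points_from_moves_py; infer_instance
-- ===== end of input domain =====

-- B replaces A's single stateful loop (mutable x/y, growing list) by a stateless per-index
-- closed form: point i = start + net prefix character counts; alternative decomposition (O(n^2) vs O(n)).


-- ===== PORT A =====
-- A's for-loop over the move string: mutable x, y and a growing points list; an unknown
-- character raises ValueError, modelled as `none` (excluded by Pre_).
def pathPointsLoopA (x y : Int) (acc : List (Int × Int)) : List Char → Option (List (Int × Int))
  | [] => some acc.reverse
  | c :: rest =>
    if c = 'N' then pathPointsLoopA x (y - 1) ((x, y - 1) :: acc) rest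
    else if c = 'S' then pathPointsLoopA x (y + 1) ((x, y + 1) :: acc) rest
    else if c = 'E' then pathPointsLoopA (x + 1) y ((x + 1, y) :: acc) rest
    else if c = 'W' then pathPointsLoopA (x - 1) y ((x - 1, y) :: acc) rest
    else none

def path_points_from_moves_py (start : Int × Int) (moves : String) : List (Int × Int) :=
  (pathPointsLoopA start.1 start.2 [start] moves.toList).getD []

-- ===== PORT B =====
-- B: validate every character against "NSEW" (the `else []` is the raised ValueError,
-- excluded by Pre_), then build each point independently as start plus the net
-- E-minus-W / S-minus-N counts over the prefix chars[:i], for i in range(len+1).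
def path_points_from_moves_py_alt (start : Int × Int) (moves : String) : List (Int × Int) :=
  if moves.toList.all (fun c => "NSEW".toList.contains c) then
    (PySem.List.pyRange 0 (moves.toList.length + 1) 1).map (fun i =>
      (start.1 + ((PySem.List.slice moves.toList none (some i)).count 'E' : Int)
               - ((PySem.List.slice moves.toList none (some i)).count 'W' : Int),
       start.2 + ((PySem.List.slice moves.toList none (some i)).count 'S' : Int)
               - ((PySem.List.slice moves.toList none (some i)).count 'N' : Int)))
  else []

-- ===== PRECONDITION & SPEC =====
-- Pre_ excludes strings with a character outside "NSEW": there A raises ValueError (no value).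
def Pre_path_points_from_moves_py (start : Int × Int) (moves : String) : Prop :=
  (moves.toList.all fun c => c == 'N' || c == 'S' || c == 'E' || c == 'W') = true
instance (start : Int × Int) (moves : String) : Decidable (Pre_path_points_from_moves_py start moves) := by unfold Pre_path_points_from_moves_py; infer_instance
def pvWitness_path_points_from_moves_py : (Int × Int) × String := ((2, 3), "NNESW")

def Spec_path_points_from_moves_py (start : Int × Int) (moves : String) (out : List (Int × Int)) : Prop := out = path_points_from_moves_py_alt start moves
instance (start : Int × Int) (moves : String) (out : List (Int × Int)) : Decidable (Spec_path_points_from_moves_py start moves out) := by unfold Spec_path_points_from_moves_py; infer_instance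

-- ===== CLAIM (what is proved, stated in full; the proofs are below) =====
def Claim_equal_path_points_from_moves_py : Prop := ∀ (start : Int × Int) (moves : String), Dom_path_points_from_moves_py start moves → Pre_path_points_from_moves_py start moves → Spec_path_points_from_moves_py start moves (path_points_from_moves_py start moves)

-- ===== LEMMAS AND PROOFS =====

-- proof-side closed form: the i-th point of the path from (x, y) along l
def ptF (x y : Int) (l : List Char) (i : Nat) : Int × Int :=
  (x + ((l.take i).count 'E' : Int) - ((l.take i).count 'W' : Int),
   y + ((l.take i).count 'S' : Int) - ((l.take i).count 'N' : Int))

lemma ptF_zero (x y : Int) (l : List Char) : ptF x y l 0 = (x, y) := by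
  simp [ptF]

lemma ptF_cons_N (x y : Int) (rest : List Char) (k : Nat) :
    ptF x y ('N' :: rest) (k + 1) = ptF x (y - 1) rest k := by
  simp [ptF]; omega

lemma ptF_cons_S (x y : Int) (rest : List Char) (k : Nat) :
    ptF x y ('S' :: rest) (k + 1) = ptF x (y + 1) rest k := by
  simp [ptF]; omega

lemma ptF_cons_E (x y : Int) (rest : List Char) (k : Nat) :
    ptF x y ('E' :: rest) (k + 1) = ptF (x + 1) y rest k := by
  simp [ptF]; omega

lemma ptF_cons_W (x y : Int) (rest : List Char) (k : Nat) :
    ptF x y ('W' :: rest) (k + 1) = ptF (x - 1) y rest k := by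
  simp [ptF]; omega

-- A's loop computes exactly the closed-form points of the suffix, appended to acc
lemma loopA_eq (l : List Char) :
    ∀ (x y : Int) (acc : List (Int × Int)),
    (l.all fun c => c == 'N' || c == 'S' || c == 'E' || c == 'W') = true →
    pathPointsLoopA x y acc l =
      some (acc.reverse ++ (List.range l.length).map (fun k => ptF x y l (k + 1))) := by
  induction l with
  | nil => intro x y acc _; simp [pathPointsLoopA]
  | cons c rest ih =>
    intro x y acc h
    simp only [List.all_cons, Bool.and_eq_true, Bool.or_eq_true, beq_iff_eq] at h
    obtain ⟨hc, hrest⟩ := h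
    rcases hc with ((h | h) | h) | h <;> subst h <;>
      simp only [pathPointsLoopA, Char.reduceEq, reduceIte, if_true, if_false] <;>
      rw [ih _ _ _ hrest] <;>
      simp only [List.length_cons, List.range_succ_eq_map, List.map_cons, List.map_map,
        List.reverse_cons, List.append_assoc, List.singleton_append, Function.comp_def,
        ptF_cons_N, ptF_cons_S, ptF_cons_E, ptF_cons_W, ptF_zero]

-- B's map over range(len+1) with prefix slices is the same closed form
lemma altB_eq (start : Int × Int) (moves : String)
    (hpre : (moves.toList.all fun c => c == 'N' || c == 'S' || c == 'E' || c == 'W') = true) :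
    path_points_from_moves_py_alt start moves =
      (List.range (moves.toList.length + 1)).map (fun k => ptF start.1 start.2 moves.toList k) := by
  have hall : moves.toList.all (fun c => "NSEW".toList.contains c) = true := by
    simp only [List.all_eq_true] at hpre ⊢
    intro c hcmem
    have := hpre c hcmem
    simp only [Bool.or_eq_true, beq_iff_eq] at this
    rcases this with ((h | h) | h) | h <;> subst h <;> decide
  have hn : (((moves.toList.length : Int) + 1) - 0).toNat = moves.toList.length + 1 := by omega
  unfold path_points_from_moves_py_alt
  rw [if_pos hall, PySem.List.pyRange_one, hn, List.map_map]
  refine List.map_congr_left ?_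
  intro k _
  simp [PySem.List.slice_to_natCast, ptF]

-- ===== VERDICT (by name: the statement is the Claim_ definition above) =====
theorem path_points_from_moves_py_spec : Claim_equal_path_points_from_moves_py := by
  intro start moves _ hpre
  unfold Spec_path_points_from_moves_py path_points_from_moves_py
  unfold Pre_path_points_from_moves_py at hpre
  rw [altB_eq start moves hpre, loopA_eq _ start.1 start.2 [start] hpre]
  simp only [Option.getD_some, List.reverse_cons, List.reverse_nil, List.nil_append,
    List.singleton_append, List.range_succ_eq_map, List.map_cons, List.map_map,
    Function.comp_def, ptF_zero]
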